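-- pv_equiv track=rewrite | github.com/Mohammed-BENHAMMOUTE/Competitve-programming- | B_Collatz_Conjecture.py | solve_collatz_conjecture
-- ===== SOURCE A (Python) =====
-- def solve_collatz_conjecture(test_cases):
--     results = []
--     for x, y, k in test_cases:
--         for _ in range(k):
--             x += 1
--             while x % y == 0:
--                 x //= y
--         results.append(x)
--     return results
-- ===== SOURCE B (Python) =====
-- def solve_collatz_conjecture(test_cases):
--     results = []
--     for x, y, k in test_cases:
--         rem = k
--         while rem > 0:
--             t = y - x % y  # increments until the next multiple of y
--             if rem < t:
--                 x += rem
--                 rem = 0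
--             else:
--                 x += t
--                 rem -= t
--                 while x % y == 0:
--                     x //= y
--         results.append(x)
--     return results
-- ===== Notes on version B (the rewrite author's own statement) =====
-- stated objective: alternative
-- what changed: Instead of incrementing x one step at a time k times, B jumps directly to the next multiple of y (t = y - x % y increments at once, capped by the remaining budget) and only then runs the division loop, so non-multiples are never visited individually.
-- outside the precondition, e.g. on solve_collatz_conjecture([(-5, 2, 1)]): A returns [-1], B returns [-1]; on solve_collatz_conjecture([(5, -2, 1)]): A returns [-3], B does not finish within the time limit
import Mathlib
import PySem

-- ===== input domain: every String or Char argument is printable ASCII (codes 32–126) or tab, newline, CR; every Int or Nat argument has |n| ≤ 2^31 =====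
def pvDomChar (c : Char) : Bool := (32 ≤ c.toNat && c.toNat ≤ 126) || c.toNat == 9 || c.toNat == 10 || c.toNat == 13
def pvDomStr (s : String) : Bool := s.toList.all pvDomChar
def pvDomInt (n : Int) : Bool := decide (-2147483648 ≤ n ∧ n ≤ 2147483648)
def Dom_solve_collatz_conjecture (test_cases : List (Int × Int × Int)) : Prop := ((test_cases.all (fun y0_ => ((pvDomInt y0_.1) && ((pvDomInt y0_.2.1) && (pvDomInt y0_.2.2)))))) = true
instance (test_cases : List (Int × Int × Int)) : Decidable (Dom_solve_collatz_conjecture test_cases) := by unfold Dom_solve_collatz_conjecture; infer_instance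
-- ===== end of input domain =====

-- B replaces A's one-increment-at-a-time loop by jumps straight to the next multiple of y,
-- so it visits no non-multiple individually; equivalence proved on Pre_ (k ≤ 0, or x ≥ 0 ∧ y ≥ 2).

-- termination measure fact for the shared inner while-loop; cited by both ports' decreasing_by
theorem pvStripDec (y x : Int) (hy : 2 ≤ y) (hx : x ≠ 0) (hm : PySem.Int.mod x y = 0) :
    (PySem.Int.floordiv x y).natAbs < x.natAbs := by
  have hq := PySem.Int.floordiv_mul_add_mod x y
  rw [hm, add_zero] at hq
  have h1 : x.natAbs = (PySem.Int.floordiv x y).natAbs * y.natAbs := by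
    rw [← Int.natAbs_mul, hq]
  have hq0' : PySem.Int.floordiv x y ≠ 0 := by
    rintro h0; rw [h0, zero_mul] at hq; exact hx hq.symm
  have hq0 : 1 ≤ (PySem.Int.floordiv x y).natAbs := Int.natAbs_pos.mpr hq0'
  have h2 : 2 ≤ y.natAbs := by omega
  rw [h1]; nlinarith

-- ===== PORT A =====
-- inner 'while x % y == 0: x //= y'; the guards '2 ≤ y ∧ x ≠ 0' only make the loop total in Lean
def pvStripA (y x : Int) : Int :=
  if h : 2 ≤ y ∧ x ≠ 0 ∧ PySem.Int.mod x y = 0 then pvStripA y (PySem.Int.floordiv x y) else x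
termination_by x.natAbs
decreasing_by exact pvStripDec y x h.1 h.2.1 h.2.2

-- 'for _ in range(k): x += 1; while …'
def pvCaseA (x y k : Int) : Int :=
  (List.range k.toNat).foldl (fun a _ => pvStripA y (a + 1)) x

def solve_collatz_conjecture (test_cases : List (Int × Int × Int)) : List Int :=
  test_cases.foldl (fun results c => results ++ [pvCaseA c.1 c.2.1 c.2.2]) []

-- ===== PORT B =====
-- inner 'while x % y == 0: x //= y' of Source B (same totalising guards as in port A)
def pvStripB (y x : Int) : Int :=
  if h : 2 ≤ y ∧ x ≠ 0 ∧ PySem.Int.mod x y = 0 then pvStripB y (PySem.Int.floordiv x y) else x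
termination_by x.natAbs
decreasing_by exact pvStripDec y x h.1 h.2.1 h.2.2

-- Source B's 'while rem > 0: t = y - x % y; …' (the '2 ≤ y' guard only makes it total)
def pvJump (y x rem : Int) : Int :=
  if hr : 0 < rem then
    if hy : 2 ≤ y then
      let t := y - PySem.Int.mod x y
      if rem < t then x + rem
      else pvJump y (pvStripB y (x + t)) (rem - t)
    else x
  else x
termination_by rem.toNat
decreasing_by
  have h1 : 1 ≤ y - PySem.Int.mod x y := by
    have := PySem.Int.mod_lt x (b := y) (by omega)
    omega
  omega

def solve_collatz_conjecture_alt (test_cases : List (Int × Int × Int)) : List Int :=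
  test_cases.foldl (fun results c => results ++ [pvJump c.2.1 c.1 c.2.2]) []

-- ===== PRECONDITION & SPEC =====
-- A case with k ≤ 0 is a no-op (both return x unchanged, whatever y is).  For k > 0, Pre_
-- excludes y ≤ 1 (y = 0 raises ZeroDivisionError, y = 1 loops forever, and for y < 0 A
-- terminates only on some inputs while B's jump step does not, so those corners are excluded)
-- and negative x, where A's termination depends on k (A diverges as soon as x reaches 0):
-- the terminating negative-x / negative-y inputs have no closed-form description.
def Pre_solve_collatz_conjecture (test_cases : List (Int × Int × Int)) : Prop :=
  ∀ c ∈ test_cases, c.2.2 ≤ 0 ∨ (0 ≤ c.1 ∧ 2 ≤ c.2.1)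
instance (test_cases : List (Int × Int × Int)) : Decidable (Pre_solve_collatz_conjecture test_cases) := by
  unfold Pre_solve_collatz_conjecture; infer_instance

def pvWitness_solve_collatz_conjecture : (List (Int × Int × Int)) := [(1, 2, 3), (7, 3, 10), (-4, 0, -2)]

def Spec_solve_collatz_conjecture (test_cases : List (Int × Int × Int)) (out : List Int) : Prop := out = solve_collatz_conjecture_alt test_cases
instance (test_cases : List (Int × Int × Int)) (out : List Int) : Decidable (Spec_solve_collatz_conjecture test_cases out) := by unfold Spec_solve_collatz_conjecture; infer_instance

-- ===== CLAIM (what is proved, stated in full; the proofs are below) =====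
def Claim_equal_solve_collatz_conjecture : Prop := ∀ (test_cases : List (Int × Int × Int)), Dom_solve_collatz_conjecture test_cases → Pre_solve_collatz_conjecture test_cases → Spec_solve_collatz_conjecture test_cases (solve_collatz_conjecture test_cases)

-- ===== LEMMAS AND PROOFS =====

theorem stripB_eq_stripA (y x : Int) : pvStripB y x = pvStripA y x := by
  suffices aux : ∀ n : Nat, ∀ x : Int, x.natAbs = n → pvStripB y x = pvStripA y x by
    exact aux x.natAbs x rfl
  intro n
  induction n using Nat.strong_induction_on with
  | _ n ih =>
    intro x hn
    rw [pvStripB.eq_def, pvStripA.eq_def]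
    split
    next h =>
      exact ih (PySem.Int.floordiv x y).natAbs
        (hn ▸ pvStripDec y x h.1 h.2.1 h.2.2) _ rfl
    next => rfl

theorem stripA_pos (y : Int) (hy : 2 ≤ y) (x : Int) (hx : 1 ≤ x) : 1 ≤ pvStripA y x := by
  suffices aux : ∀ n : Nat, ∀ x : Int, x.natAbs = n → 1 ≤ x → 1 ≤ pvStripA y x by
    exact aux x.natAbs x rfl hx
  intro n
  induction n using Nat.strong_induction_on with
  | _ n ih =>
    intro x hn hx1
    rw [pvStripA.eq_def]
    split
    next h =>
      obtain ⟨-, hx0, hm⟩ := h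
      have hq := PySem.Int.floordiv_mul_add_mod x y
      rw [hm, add_zero] at hq
      have hqpos : 1 ≤ PySem.Int.floordiv x y := by
        by_contra hq1
        push Not at hq1
        have : PySem.Int.floordiv x y * y ≤ 0 :=
          mul_nonpos_iff.mpr (Or.inr ⟨by omega, by omega⟩)
        omega
      exact ih (PySem.Int.floordiv x y).natAbs
        (hn ▸ pvStripDec y x hy hx0 hm) _ rfl hqpos
    next => exact hx1

theorem stripA_of_not_dvd (y x : Int) (hm : PySem.Int.mod x y ≠ 0) : pvStripA y x = x := by
  rw [pvStripA.eq_def, dif_neg]; tauto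

-- the per-case step of A
def pvStepA (y a : Int) : Int := pvStripA y (a + 1)

theorem foldl_range_eq_iterate (f : Int → Int) (x : Int) (n : Nat) :
    (List.range n).foldl (fun a _ => f a) x = f^[n] x := by
  induction n with
  | zero => simp
  | succ m ih => rw [List.range_succ, List.foldl_append, ih, Function.iterate_succ_apply']; rfl

theorem iter_stretch (y x : Int) (hy : 2 ≤ y) (j : Nat)
    (hj : (j : Int) < y - PySem.Int.mod x y) :
    (pvStepA y)^[j] x = x + j := by
  induction j with
  | zero => simp
  | succ m ih =>
    have hm : (m : Int) < y - PySem.Int.mod x y := by push_cast at hj ⊢; omega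
    rw [Function.iterate_succ_apply', ih hm, pvStepA]
    have hr0 : 0 ≤ PySem.Int.mod x y := PySem.Int.mod_nonneg x (by omega)
    have hrep : x = y * (PySem.Int.floordiv x y) + PySem.Int.mod x y := by
      have := PySem.Int.floordiv_mul_add_mod x y
      linarith
    have hyy : (0:Int) < y := by omega
    have hne : PySem.Int.mod (x + ↑m + 1) y ≠ 0 := by
      rw [PySem.Int.mod_eq_emod_of_pos hyy]
      rw [PySem.Int.mod_eq_emod_of_pos hyy] at hj hm hr0
      have : x + (m : Int) + 1 = (x % y + m + 1) + y * (x / y) := by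
        have := Int.emod_add_mul_ediv x y; linarith
      rw [this, Int.add_mul_emod_self_left, Int.emod_eq_of_lt (by push_cast at hj; omega) (by push_cast at hj; omega)]
      push_cast at hj; omega
    rw [stripA_of_not_dvd y _ hne]
    push_cast; ring

theorem iter_hit (y x : Int) (hy : 2 ≤ y) :
    (pvStepA y)^[(y - PySem.Int.mod x y).toNat] x = pvStripA y (x + (y - PySem.Int.mod x y)) := by
  have hr0 : 0 ≤ PySem.Int.mod x y := PySem.Int.mod_nonneg x (by omega)
  have hrlt : PySem.Int.mod x y < y := PySem.Int.mod_lt x (by omega)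
  set t : Int := y - PySem.Int.mod x y with ht
  have ht1 : 1 ≤ t := by omega
  have htn : t.toNat = (t.toNat - 1) + 1 := by omega
  rw [htn, Function.iterate_succ_apply', iter_stretch y x hy (t.toNat - 1) (by omega)]
  rw [pvStepA]
  congr 1
  omega

theorem jump_eq (y : Int) (hy : 2 ≤ y) :
    ∀ n : Nat, ∀ rem x : Int, rem.toNat = n → 0 ≤ x →
      pvJump y x rem = (pvStepA y)^[n] x := by
  intro n
  induction n using Nat.strong_induction_on with
  | _ n ih =>
    intro rem x hn hx
    rw [pvJump]
    by_cases hr : 0 < rem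
    · rw [dif_pos hr, dif_pos hy]
      have hr0 : 0 ≤ PySem.Int.mod x y := PySem.Int.mod_nonneg x (by omega)
      have hrlt : PySem.Int.mod x y < y := PySem.Int.mod_lt x (by omega)
      set t : Int := y - PySem.Int.mod x y with ht
      have ht1 : 1 ≤ t := by omega
      by_cases hlt : rem < t
      · rw [if_pos hlt]
        have := iter_stretch y x hy rem.toNat (by omega)
        rw [hn] at this
        rw [this]; omega
      · rw [if_neg hlt]
        have hsplit : n = (rem - t).toNat + t.toNat := by omega
        have hx1 : 1 ≤ pvStripA y (x + t) := stripA_pos y hy (x + t) (by omega)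
        rw [stripB_eq_stripA,
          ih (rem - t).toNat (by omega) (rem - t) _ rfl (by omega),
          hsplit, Function.iterate_add_apply, iter_hit y x hy]
    · rw [dif_neg hr]
      have : n = 0 := by omega
      rw [this]; rfl

theorem case_eq (x y k : Int) (h : k ≤ 0 ∨ (0 ≤ x ∧ 2 ≤ y)) :
    pvCaseA x y k = pvJump y x k := by
  rcases h with hk | ⟨hx, hy⟩
  · have hk0 : k.toNat = 0 := by omega
    rw [pvCaseA, hk0, pvJump]
    simp [not_lt.mpr hk]
  · rw [pvCaseA]
    exact (foldl_range_eq_iterate (pvStepA y) x k.toNat).trans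
      (jump_eq y hy k.toNat k x rfl hx).symm

theorem foldl_append_map (g : (Int × Int × Int) → Int) (tc : List (Int × Int × Int)) (acc : List Int) :
    tc.foldl (fun results c => results ++ [g c]) acc = acc ++ tc.map g := by
  induction tc generalizing acc with
  | nil => simp
  | cons c cs ih => simp [List.foldl_cons, ih]

-- ===== VERDICT (by name: the statement is the Claim_ definition above) =====
theorem solve_collatz_conjecture_spec : Claim_equal_solve_collatz_conjecture := by
  intro tc _ hpre
  unfold Spec_solve_collatz_conjecture solve_collatz_conjecture solve_collatz_conjecture_alt
  rw [foldl_append_map, foldl_append_map]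
  simp only [List.nil_append]
  apply List.map_congr_left
  intro c hc
  exact case_eq c.1 c.2.1 c.2.2 (hpre c hc)
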